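-- pv_equiv track=rewrite | github.com/famousfields/meeting-summary-agentic-pipeline | meeting_pipeline.py | remap_speakers
-- ===== SOURCE A (Python) =====
-- def remap_speakers(final_transcript):
--     speaker_map = {}
--     next_label = ord("A")
--     remapped = []
--
--     for speaker, text in final_transcript:
--         if speaker not in speaker_map and speaker != "UNKNOWN":
--             speaker_map[speaker] = chr(next_label)
--             next_label += 1
--         remapped.append((speaker_map.get(speaker, "UNKNOWN"), text))
--
--     return remapped
-- ===== SOURCE B (Python) =====
-- def remap_speakers(final_transcript):
--     # No label table at all: each speaker's letter is a closed-form function of the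
--     # input -- chr(ord("A") + number of distinct non-UNKNOWN speakers appearing
--     # strictly before this speaker's first occurrence in the transcript.
--     speakers = [s for s, _ in final_transcript]
--     out = []
--     for s, t in final_transcript:
--         if s == "UNKNOWN":
--             out.append(("UNKNOWN", t))
--         else:
--             j = speakers.index(s)  # first occurrence of s
--             rank = len({x for x in speakers[:j] if x != "UNKNOWN"})
--             out.append((chr(ord("A") + rank), t))
--     return out
-- ===== Notes on version B (the rewrite author's own statement) =====
-- stated objective: alternative
-- what changed: Drops the speaker map entirely: instead of threading a dict and a counter through one loop, B computes each label independently in closed form as chr(ord('A') + number of distinct non-UNKNOWN speakers before that speaker's first occurrence), trading O(n) with a dict for O(n^2) without one.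
import Mathlib
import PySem

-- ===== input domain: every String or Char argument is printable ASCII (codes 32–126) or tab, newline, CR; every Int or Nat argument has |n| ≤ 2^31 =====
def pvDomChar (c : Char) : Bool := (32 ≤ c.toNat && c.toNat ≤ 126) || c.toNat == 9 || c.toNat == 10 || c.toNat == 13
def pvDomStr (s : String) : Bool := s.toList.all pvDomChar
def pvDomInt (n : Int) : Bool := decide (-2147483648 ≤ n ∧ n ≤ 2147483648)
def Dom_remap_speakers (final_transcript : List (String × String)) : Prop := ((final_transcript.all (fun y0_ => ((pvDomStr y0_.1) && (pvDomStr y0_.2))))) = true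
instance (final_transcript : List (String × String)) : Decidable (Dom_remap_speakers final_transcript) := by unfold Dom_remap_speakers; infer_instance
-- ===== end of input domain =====

-- B drops A's speaker map entirely: each label is computed independently, in closed form, as
-- chr(ord('A') + number of distinct non-UNKNOWN speakers before that speaker's first occurrence)
-- (objective: alternative — O(n^2) without a dict instead of A's O(n) stateful loop).

-- shared model of Python's chr(n) builtin on an int label
def pyChr (n : Int) : String := (Char.ofNat n.toNat).toString

-- ===== PORT A =====
-- the for-loop of A as structural recursion over the transcript, state = (speaker_map, next_label, remapped)
def loopA (m : PySem.Dict String String) (n : Int) (acc : List (String × String)) :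
    List (String × String) → List (String × String)
  | [] => acc
  | (s, t) :: rest =>
    if ¬ m.contains s ∧ s ≠ "UNKNOWN" then
      loopA (m.insert s (pyChr n)) (n + 1)
        (acc ++ [((m.insert s (pyChr n)).getD s "UNKNOWN", t)]) rest
    else
      loopA m n (acc ++ [(m.getD s "UNKNOWN", t)]) rest

def remap_speakers (final_transcript : List (String × String)) : List (String × String) :=
  loopA PySem.Dict.empty 65 [] final_transcript

-- ===== PORT B =====
-- Source B's for-loop appending to `out`; speakers.index(s) never raises here (s comes from speakers),
-- so `.getD 0` is unreachable padding; speakers[:j] with 0 ≤ j ≤ len is exactly `take j`.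
def remap_speakers_alt (final_transcript : List (String × String)) : List (String × String) :=
  let speakers := final_transcript.map (·.1)
  final_transcript.foldl (fun out p =>
    if p.1 = "UNKNOWN" then out ++ [("UNKNOWN", p.2)]
    else
      let j : Nat := (PySem.List.index? speakers p.1).getD 0
      let rank : Nat :=
        (PySem.Set.ofList ((speakers.take j).filter (fun x => x ≠ "UNKNOWN"))).length
      out ++ [(pyChr (65 + (rank : Int)), p.2)]) []

-- ===== PRECONDITION & SPEC =====
def Spec_remap_speakers (final_transcript : List (String × String)) (out : List (String × String)) : Prop := out = remap_speakers_alt final_transcript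
instance (final_transcript : List (String × String)) (out : List (String × String)) : Decidable (Spec_remap_speakers final_transcript out) := by unfold Spec_remap_speakers; infer_instance

-- ===== CLAIM (what is proved, stated in full; the proofs are below) =====
def Claim_equal_remap_speakers : Prop := ∀ (final_transcript : List (String × String)), Dom_remap_speakers final_transcript → Spec_remap_speakers final_transcript (remap_speakers final_transcript)

-- ===== LEMMAS AND PROOFS =====

-- ---- A-side characterisation: A's output is a map over ts by lookup in a first-appearance table ----

-- the label table on a first-appearance list
def mapOf (l : List String) : PySem.Dict String String :=
  (PySem.List.enumerate l).foldl (fun d is => d.insert is.2 (pyChr (65 + is.1))) PySem.Dict.empty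

-- the first-appearance list accumulated along the transcript
def seenAll (a : List String) (ts : List (String × String)) : List String :=
  ts.foldl (fun a p => if p.1 ≠ "UNKNOWN" then PySem.Set.add a p.1 else a) a

lemma seenAll_cons (a : List String) (p : String × String) (ts : List (String × String)) :
    seenAll a (p :: ts) = seenAll (if p.1 ≠ "UNKNOWN" then PySem.Set.add a p.1 else a) ts := rfl

lemma mapOf_append_singleton (l : List String) (x : String) :
    mapOf (l ++ [x]) = (mapOf l).insert x (pyChr (65 + (l.length : Int))) := by
  simp [mapOf, PySem.List.enumerate_append, PySem.List.enumerate_cons, PySem.List.enumerate_nil]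

lemma getD_mapOf_of_not_mem {l : List String} {s : String} (h : s ∉ l) :
    (mapOf l).getD s "UNKNOWN" = "UNKNOWN" := by
  induction l using List.reverseRecOn with
  | nil => simp [mapOf, PySem.List.enumerate_nil, PySem.Dict.getD_empty]
  | append_singleton l x ih =>
    rw [mapOf_append_singleton, PySem.Dict.getD_insert]
    simp only [List.mem_append, List.mem_singleton, not_or] at h
    rw [if_neg h.2]
    exact ih h.1

lemma getD_mapOf_append_of_not_mem {δ : List String} {s : String} (l : List String) (h : s ∉ δ) :
    (mapOf (l ++ δ)).getD s "UNKNOWN" = (mapOf l).getD s "UNKNOWN" := by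
  induction δ using List.reverseRecOn with
  | nil => simp
  | append_singleton δ x ih =>
    simp only [List.mem_append, List.mem_singleton, not_or] at h
    rw [← List.append_assoc, mapOf_append_singleton, PySem.Dict.getD_insert, if_neg h.2]
    exact ih h.1

lemma getD_mapOf_last (l : List String) (s : String) :
    (mapOf (l ++ [s])).getD s "UNKNOWN" = pyChr (65 + (l.length : Int)) := by
  rw [mapOf_append_singleton, PySem.Dict.getD_insert, if_pos rfl]

lemma keys_mapOf (l : List String) (h : l.Nodup) : (mapOf l).keys = l := by
  rw [mapOf, PySem.Dict.keys_foldl_insert_key]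
  simp [PySem.List.map_snd_enumerate, PySem.Set.update_nil_left,
    PySem.Set.ofList_eq_self_of_nodup _ h]

lemma contains_mapOf {l : List String} (s : String) (h : l.Nodup) :
    ((mapOf l).contains s = true) ↔ s ∈ l := by
  rw [PySem.Dict.contains_iff_mem_keys, keys_mapOf l h]

lemma seenAll_append : ∀ (ts : List (String × String)) (a : List String),
    ∃ δ, seenAll a ts = a ++ δ := by
  intro ts
  induction ts with
  | nil => intro a; exact ⟨[], by simp [seenAll]⟩
  | cons p rest ih =>
    intro a
    rw [seenAll_cons]
    by_cases h : p.1 = "UNKNOWN"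
    · obtain ⟨δ, hδ⟩ := ih a
      exact ⟨δ, by simpa [h] using hδ⟩
    · by_cases hm : p.1 ∈ a
      · obtain ⟨δ, hδ⟩ := ih a
        exact ⟨δ, by simpa [h, PySem.Set.add_of_mem hm] using hδ⟩
      · obtain ⟨δ, hδ⟩ := ih (a ++ [p.1])
        refine ⟨p.1 :: δ, ?_⟩
        rw [if_pos h, PySem.Set.add_of_not_mem hm, hδ, List.append_assoc, List.singleton_append]

lemma seenAll_nodup : ∀ (ts : List (String × String)) (a : List String),
    a.Nodup → (seenAll a ts).Nodup := by
  intro ts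
  induction ts with
  | nil => intro a h; exact h
  | cons p rest ih =>
    intro a h
    rw [seenAll_cons]
    split
    · exact ih _ (PySem.Set.nodup_add _ _ h)
    · exact ih _ h

lemma seenAll_unknown : ∀ (ts : List (String × String)) (a : List String),
    "UNKNOWN" ∉ a → "UNKNOWN" ∉ seenAll a ts := by
  intro ts
  induction ts with
  | nil => intro a h; exact h
  | cons p rest ih =>
    intro a h
    rw [seenAll_cons]
    split
    · refine ih _ ?_
      rw [PySem.Set.mem_add]
      rintro (hc | hc)
      · exact h hc
      · rename_i hne; exact hne hc.symm
    · exact ih _ h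

-- on a speaker the prefix already labels, the final table agrees with the prefix table
lemma getD_seenAll_of_mem {a : List String} {s : String} (ts : List (String × String))
    (hnd : a.Nodup) (hs : s ∈ a) :
    (mapOf (seenAll a ts)).getD s "UNKNOWN" = (mapOf a).getD s "UNKNOWN" := by
  obtain ⟨δ, hδ⟩ := seenAll_append ts a
  have hnodup : (a ++ δ).Nodup := hδ ▸ seenAll_nodup ts a hnd
  have hsδ : s ∉ δ := fun hmem => (List.disjoint_of_nodup_append hnodup) hs hmem
  rw [hδ, getD_mapOf_append_of_not_mem a hsδ]

lemma main_loop : ∀ (ts : List (String × String)) (a : List String) (acc : List (String × String)),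
    a.Nodup → "UNKNOWN" ∉ a →
    loopA (mapOf a) (65 + (a.length : Int)) acc ts
      = acc ++ ts.map (fun p => ((mapOf (seenAll a ts)).getD p.1 "UNKNOWN", p.2)) := by
  intro ts
  induction ts with
  | nil => intro a acc _ _; simp [loopA, seenAll]
  | cons p rest ih =>
    intro a acc hnd hunk
    obtain ⟨s, t⟩ := p
    rw [loopA]
    by_cases hu : s = "UNKNOWN"
    · subst hu
      rw [if_neg (by simp), ih a _ hnd hunk]
      have h1 : (mapOf a).getD "UNKNOWN" "UNKNOWN" = "UNKNOWN" := getD_mapOf_of_not_mem hunk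
      have h2 : (mapOf (seenAll a rest)).getD "UNKNOWN" "UNKNOWN" = "UNKNOWN" :=
        getD_mapOf_of_not_mem (seenAll_unknown rest a hunk)
      simp [seenAll_cons, h1, h2]
    · by_cases hm : s ∈ a
      · rw [if_neg (by simp [(contains_mapOf s hnd).mpr hm]), ih a _ hnd hunk]
        simp [seenAll_cons, hu, PySem.Set.add_of_mem hm, getD_seenAll_of_mem rest hnd hm]
      · rw [if_pos ⟨by simp [contains_mapOf s hnd, hm], hu⟩]
        have hnd' : (a ++ [s]).Nodup := by
          rw [List.nodup_append]
          refine ⟨hnd, List.nodup_singleton s, ?_⟩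
          intro x hx
          simp only [List.mem_singleton, forall_eq]
          intro hxe
          exact hm (hxe ▸ hx)
        have hunk' : "UNKNOWN" ∉ a ++ [s] := by
          simp only [List.mem_append, List.mem_singleton, not_or]
          exact ⟨hunk, fun h => hu h.symm⟩
        have hcast : (65 : Int) + (a.length : Int) + 1 = 65 + ((a ++ [s]).length : Int) := by
          simp only [List.length_append, List.length_singleton]; push_cast; ring
        rw [show (mapOf a).insert s (pyChr (65 + (a.length : Int))) = mapOf (a ++ [s]) from
            (mapOf_append_singleton a s).symm,
          hcast, ih (a ++ [s]) _ hnd' hunk']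
        have hlab : (mapOf (seenAll (a ++ [s]) rest)).getD s "UNKNOWN"
            = pyChr (65 + (a.length : Int)) := by
          rw [getD_seenAll_of_mem rest hnd' (by simp), getD_mapOf_last]
        simp [seenAll_cons, hu, PySem.Set.add_of_not_mem hm, hlab, getD_mapOf_last]

-- ---- B-side lemmas ----

-- B's appending fold is a map
lemma foldl_append_map {α β : Type} (f : List β → α → List β) (g : α → β)
    (hf : ∀ out p, f out p = out ++ [g p]) :
    ∀ (l : List α) (acc : List β), l.foldl f acc = acc ++ l.map g := by
  intro l
  induction l with
  | nil => intro acc; simp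
  | cons x xs ih => intro acc; rw [List.foldl_cons, hf, ih]; simp

-- seenAll is the Set.add-fold over the non-UNKNOWN speakers
lemma seenAll_eq_foldl : ∀ (ts : List (String × String)) (a : List String),
    ((ts.map (·.1)).filter (fun x => x ≠ "UNKNOWN")).foldl PySem.Set.add a = seenAll a ts := by
  intro ts
  induction ts with
  | nil => intro a; rfl
  | cons p rest ih =>
    intro a
    rw [seenAll_cons, List.map_cons, List.filter_cons]
    by_cases h : p.1 = "UNKNOWN"
    · rw [if_neg (by simp [h]), if_neg (by simp [h])]
      exact ih a
    · rw [if_pos (by simp [h]), if_pos (by simp [h]), List.foldl_cons]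
      exact ih (PySem.Set.add a p.1)

lemma foldl_add_ex : ∀ (l : List String) (a : List String),
    ∃ δ, l.foldl PySem.Set.add a = a ++ δ := by
  intro l
  induction l with
  | nil => intro a; exact ⟨[], by simp⟩
  | cons x xs ih =>
    intro a
    by_cases hm : x ∈ a
    · obtain ⟨δ, hδ⟩ := ih a
      exact ⟨δ, by simpa [PySem.Set.add_of_mem hm] using hδ⟩
    · obtain ⟨δ, hδ⟩ := ih (a ++ [x])
      refine ⟨x :: δ, ?_⟩
      rw [List.foldl_cons, PySem.Set.add_of_not_mem hm, hδ, List.append_assoc,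
        List.singleton_append]

-- ---- the element-wise agreement ----

lemma label_agree (ts : List (String × String)) (p : String × String) (hp : p ∈ ts) :
    ((mapOf (seenAll [] ts)).getD p.1 "UNKNOWN", p.2)
      = (if p.1 = "UNKNOWN" then ("UNKNOWN", p.2)
         else
           (pyChr (65 + (((PySem.Set.ofList
             (((ts.map (·.1)).take
                 ((PySem.List.index? (ts.map (·.1)) p.1).getD 0)).filter
               (fun x => x ≠ "UNKNOWN"))).length : Nat) : Int)), p.2)) := by
  obtain ⟨s, t⟩ := p
  by_cases hu : s = "UNKNOWN"
  · subst hu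
    rw [if_pos rfl, getD_mapOf_of_not_mem (seenAll_unknown ts [] (by simp))]
  · rw [if_neg hu]
    have hs : s ∈ ts.map (·.1) := List.mem_map.mpr ⟨(s, t), hp, rfl⟩
    -- first-occurrence decomposition of the speakers list
    obtain ⟨j, hj⟩ := Option.isSome_iff_exists.mp
      ((PySem.List.index?_isSome_iff ..).mpr hs)
    obtain ⟨pre, suf, hdec, hlen, hpre⟩ := (PySem.List.index?_eq_some_iff ..).mp hj
    have htake : (ts.map (·.1)).take ((PySem.List.index? (ts.map (·.1)) s).getD 0) = pre := by
      rw [hj, Option.getD_some, ← hlen, hdec, List.take_left]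
    -- B's rank list
    set A1 : List String := PySem.Set.ofList (pre.filter (fun x => x ≠ "UNKNOWN")) with hA1
    have hsA1 : s ∉ A1 := by
      intro hmem
      exact hpre (List.mem_of_mem_filter ((PySem.Set.mem_ofList ..).mp hmem))
    -- A's seen list decomposes as A1 ++ [s] ++ δ with s ∉ δ
    have hseen0 : seenAll [] ts
        = (pre.filter (fun x => x ≠ "UNKNOWN") ++ s :: suf.filter (fun x => x ≠ "UNKNOWN")).foldl
            PySem.Set.add [] := by
      rw [← seenAll_eq_foldl ts [], hdec]
      congr 1
      rw [List.filter_append, List.filter_cons, if_pos (by simp [hu])]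
    obtain ⟨δ, hδ⟩ := foldl_add_ex (suf.filter (fun x => x ≠ "UNKNOWN")) (A1 ++ [s])
    have hseen : seenAll [] ts = (A1 ++ [s]) ++ δ := by
      rw [hseen0, List.foldl_append, List.foldl_cons, ← PySem.Set.ofList_eq_foldl, ← hA1,
        PySem.Set.add_of_not_mem hsA1, hδ]
    have hnd : (seenAll [] ts).Nodup := seenAll_nodup ts [] List.nodup_nil
    have hsδ : s ∉ δ := by
      rw [hseen] at hnd
      intro hmem
      exact (List.disjoint_of_nodup_append hnd) (by simp) hmem
    rw [hseen, getD_mapOf_append_of_not_mem (A1 ++ [s]) hsδ, getD_mapOf_last, htake, ← hA1]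

-- ===== VERDICT (by name: the statement is the Claim_ definition above) =====
theorem remap_speakers_spec : Claim_equal_remap_speakers := by
  intro ts _
  unfold Spec_remap_speakers
  have hA := main_loop ts [] [] List.nodup_nil (by simp)
  simp only [List.length_nil, Nat.cast_zero, add_zero, List.nil_append] at hA
  show loopA (mapOf []) 65 [] ts = remap_speakers_alt ts
  rw [hA]
  have hB : remap_speakers_alt ts
      = ts.map (fun p =>
          if p.1 = "UNKNOWN" then ("UNKNOWN", p.2)
          else
            (pyChr (65 + (((PySem.Set.ofList
              (((ts.map (·.1)).take
                  ((PySem.List.index? (ts.map (·.1)) p.1).getD 0)).filter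
                (fun x => x ≠ "UNKNOWN"))).length : Nat) : Int)), p.2)) := by
    show List.foldl _ [] ts = _
    rw [foldl_append_map _ _ (fun out p => ?_) ts []]
    · rw [List.nil_append]
    · by_cases h : p.1 = "UNKNOWN" <;> simp only [h, if_pos, if_neg, ne_eq, not_false_eq_true]
  rw [hB]
  exact List.map_congr_left (fun p hp => label_agree ts p hp)
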